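-- pv_equiv track=rewrite | github.com/namkoong-lab/SynthTools | scripts/multi_turn_human.py | extract_all_function_calls
-- ===== SOURCE A (Python) =====
-- from typing import List, Optional
--
-- def extract_all_function_calls(text: str) -> List[str]:
--     """Extract all function-call-like strings from text using the same scanner logic."""
--     calls: List[str] = []
--     i = 0
--     n = len(text)
--     while i < n:
--         # find start of name
--         while i < n and not (text[i].isalpha() or text[i] == '_'):
--             i += 1
--         if i >= n:
--             break
--         name_start = i
--         while i < n and (text[i].isalnum() or text[i] == '_'):
--             i += 1
--         # skip ws
--         while i < n and text[i].isspace():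
--             i += 1
--         if i >= n or text[i] != '(':
--             continue
--         # scan params with nesting
--         j = i + 1
--         depth = 1
--         in_string = False
--         string_char = None
--         escape = False
--         while j < n and depth > 0:
--             ch = text[j]
--             if escape:
--                 escape = False
--             elif ch == '\\':
--                 escape = True
--             elif in_string:
--                 if ch == string_char:
--                     in_string = False
--             elif ch in ('"', "'"):
--                 in_string = True
--                 string_char = ch
--             elif ch == '(':
--                 depth += 1
--             elif ch == ')':
--                 depth -= 1
--             j += 1
--         if depth == 0:
--             calls.append(text[name_start:j])
--             i = j
--         else:
--             break
--     return calls
-- ===== SOURCE B (Python) =====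
-- from typing import List, Optional
--
-- def extract_all_function_calls(text: str) -> List[str]:
--     """Paren-anchored scanner: jump to each '(', recover the call name by
--     backtracking, then run the balanced-depth scan."""
--     calls: List[str] = []
--     n = len(text)
--     i = 0
--     while i < n:
--         if text[i] != '(':
--             i += 1
--             continue
--         # backtrack: skip whitespace, then the alnum/_ run just before the '('
--         q = i
--         while q > 0 and text[q - 1].isspace():
--             q -= 1
--         r = q
--         while r > 0 and (text[r - 1].isalnum() or text[r - 1] == '_'):
--             r -= 1
--         m = next((k for k in range(r, q) if text[k].isalpha() or text[k] == '_'), None)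
--         if m is None:
--             i += 1
--             continue
--         # balanced-depth scan with string/escape tracking (same as the original)
--         j = i + 1
--         depth = 1
--         in_string = False
--         string_char = None
--         escape = False
--         while j < n and depth > 0:
--             ch = text[j]
--             if escape:
--                 escape = False
--             elif ch == '\\':
--                 escape = True
--             elif in_string:
--                 if ch == string_char:
--                     in_string = False
--             elif ch in ('"', "'"):
--                 in_string = True
--                 string_char = ch
--             elif ch == '(':
--                 depth += 1
--             elif ch == ')':
--                 depth -= 1
--             j += 1
--         if depth != 0:
--             break  # unbalanced to end of text: nothing further can close
--         calls.append(text[m:j])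
--         i = j
--     return calls
-- ===== Notes on version B (the rewrite author's own statement) =====
-- stated objective: alternative
-- what changed: B is a paren-anchored scanner: instead of A's repeated name/whitespace forward passes it jumps to each opening parenthesis, recovers the call name by backtracking over whitespace and the preceding alnum/underscore run, then runs the same balanced-depth scan; names not followed by an opening parenthesis are never tokenized.
import Mathlib
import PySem

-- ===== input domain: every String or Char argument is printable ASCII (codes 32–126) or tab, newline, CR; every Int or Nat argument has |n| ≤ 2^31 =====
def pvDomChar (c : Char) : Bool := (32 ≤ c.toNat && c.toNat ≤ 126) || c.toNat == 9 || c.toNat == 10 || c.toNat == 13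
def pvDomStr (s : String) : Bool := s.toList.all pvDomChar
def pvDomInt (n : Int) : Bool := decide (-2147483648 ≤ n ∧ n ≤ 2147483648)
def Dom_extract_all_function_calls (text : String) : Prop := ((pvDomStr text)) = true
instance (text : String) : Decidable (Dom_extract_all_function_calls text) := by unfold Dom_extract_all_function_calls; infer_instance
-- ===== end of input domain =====

-- B is a paren-anchored scanner (backtrack from each '(' for the name) instead of A's
-- name-first forward scanner; objective: alternative decomposition, same exact results.

-- shared character predicates: both Pythons test `c.isalpha() or c == '_'` and
-- `c.isalnum() or c == '_'` (PySem.Chars.* are exact for the ASCII domain)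
def pvNameStart (c : Char) : Bool := PySem.Chars.isalpha c || c = '_'
def pvNameChar (c : Char) : Bool := PySem.Chars.isalnum c || c = '_'

-- balanced-depth parameter scanner with string/escape tracking; this loop appears
-- verbatim in BOTH Pythons (A inlines it, Source B repeats it), so both ports share it.
-- state: (j, depth, in_string, string_char, escape); returns final (j, depth).
def pvScan (cs : List Char) (j : Nat) (depth : Nat) (ins : Bool) (sc : Option Char) (esc : Bool) : Nat × Nat :=
  if h : j < cs.length ∧ 0 < depth then
    let ch := cs.getD j ' '
    if esc then pvScan cs (j + 1) depth ins sc false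
    else if ch = '\\' then pvScan cs (j + 1) depth ins sc true
    else if ins then
      (if sc = some ch then pvScan cs (j + 1) depth false sc esc
       else pvScan cs (j + 1) depth ins sc esc)
    else if ch = '"' ∨ ch = '\'' then pvScan cs (j + 1) depth true (some ch) esc
    else if ch = '(' then pvScan cs (j + 1) (depth + 1) ins sc esc
    else if ch = ')' then pvScan cs (j + 1) (depth - 1) ins sc esc
    else pvScan cs (j + 1) depth ins sc esc
  else (j, depth)
termination_by cs.length - j
decreasing_by all_goals exact Nat.sub_succ_lt_self _ _ h.1

-- ===== PORT A =====
-- `while i < n and not (text[i].isalpha() or text[i] == '_')`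
def pvSkipNonName (cs : List Char) (i : Nat) : Nat :=
  if h : i < cs.length ∧ pvNameStart (cs.getD i ' ') = false then pvSkipNonName cs (i + 1) else i
termination_by cs.length - i
decreasing_by exact Nat.sub_succ_lt_self _ _ h.1

-- `while i < n and (text[i].isalnum() or text[i] == '_')`
def pvSkipName (cs : List Char) (i : Nat) : Nat :=
  if h : i < cs.length ∧ pvNameChar (cs.getD i ' ') = true then pvSkipName cs (i + 1) else i
termination_by cs.length - i
decreasing_by exact Nat.sub_succ_lt_self _ _ h.1

-- `while i < n and text[i].isspace()`
def pvSkipWs (cs : List Char) (i : Nat) : Nat :=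
  if h : i < cs.length ∧ PySem.Chars.isspace (cs.getD i ' ') = true then pvSkipWs cs (i + 1) else i
termination_by cs.length - i
decreasing_by exact Nat.sub_succ_lt_self _ _ h.1

-- A's outer `while i < n` loop: find a name start, cross the name, skip whitespace,
-- require '(', scan balanced, emit text[name_start:j] and resume at j (break if unbalanced).
-- The loop runs on fuel (cs.length + 1 is always enough: its index strictly increases).
def pvALoop (cs : List Char) : Nat → Nat → List String
  | 0, _ => []
  | fuel + 1, i =>
    if i < cs.length then
      if pvSkipNonName cs i < cs.length then
        if pvSkipWs cs (pvSkipName cs (pvSkipNonName cs i)) < cs.length ∧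
            cs.getD (pvSkipWs cs (pvSkipName cs (pvSkipNonName cs i))) ' ' = '(' then
          if (pvScan cs (pvSkipWs cs (pvSkipName cs (pvSkipNonName cs i)) + 1) 1 false none false).2 = 0 then
            -- text[name_start:j] — exact for 0 ≤ s ≤ j ≤ n (PySem.List.slice is Python's slice)
            String.ofList (PySem.List.slice cs (some ((pvSkipNonName cs i : Nat) : Int))
                (some (((pvScan cs (pvSkipWs cs (pvSkipName cs (pvSkipNonName cs i)) + 1) 1 false none false).1 : Nat) : Int))) ::
              pvALoop cs fuel (pvScan cs (pvSkipWs cs (pvSkipName cs (pvSkipNonName cs i)) + 1) 1 false none false).1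
          else []
        else pvALoop cs fuel (pvSkipWs cs (pvSkipName cs (pvSkipNonName cs i)))
      else []
    else []

def extract_all_function_calls (text : String) : List String :=
  pvALoop text.toList (text.toList.length + 1) 0

-- ===== PORT B =====
-- `while q > 0 and text[q-1].isspace(): q -= 1`
def pvWsBack (cs : List Char) (q : Nat) : Nat :=
  if h : 0 < q ∧ PySem.Chars.isspace (cs.getD (q - 1) ' ') = true then pvWsBack cs (q - 1) else q
termination_by q
decreasing_by exact Nat.sub_lt h.1 Nat.one_pos

-- `while r > 0 and (text[r-1].isalnum() or text[r-1] == '_'): r -= 1`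
def pvRunBack (cs : List Char) (r : Nat) : Nat :=
  if h : 0 < r ∧ pvNameChar (cs.getD (r - 1) ' ') = true then pvRunBack cs (r - 1) else r
termination_by r
decreasing_by exact Nat.sub_lt h.1 Nat.one_pos

-- `next((k for k in range(r, q) if text[k].isalpha() or text[k] == '_'), None)`
def pvFirstName (cs : List Char) (r q : Nat) : Option Nat :=
  if h : r < q then
    if pvNameStart (cs.getD r ' ') then some r else pvFirstName cs (r + 1) q
  else none
termination_by q - r
decreasing_by exact Nat.sub_succ_lt_self _ _ h

-- B's single `while i < n` loop: anchor on '(', backtrack for the name, scan balanced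
-- (break if unbalanced); fuel as in pvALoop (the index strictly increases).
def pvBLoop (cs : List Char) : Nat → Nat → List String
  | 0, _ => []
  | fuel + 1, i =>
    if i < cs.length then
      if cs.getD i ' ' = '(' then
        match pvFirstName cs (pvRunBack cs (pvWsBack cs i)) (pvWsBack cs i) with
        | none => pvBLoop cs fuel (i + 1)
        | some m =>
          if (pvScan cs (i + 1) 1 false none false).2 = 0 then
            String.ofList (PySem.List.slice cs (some ((m : Nat) : Int))
                (some (((pvScan cs (i + 1) 1 false none false).1 : Nat) : Int))) ::
              pvBLoop cs fuel (pvScan cs (i + 1) 1 false none false).1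
          else []
      else pvBLoop cs fuel (i + 1)
    else []

def extract_all_function_calls_alt (text : String) : List String :=
  pvBLoop text.toList (text.toList.length + 1) 0

-- ===== PRECONDITION & SPEC =====
def Spec_extract_all_function_calls (text : String) (out : List String) : Prop := out = extract_all_function_calls_alt text
instance (text : String) (out : List String) : Decidable (Spec_extract_all_function_calls text out) := by unfold Spec_extract_all_function_calls; infer_instance

-- ===== CLAIM (what is proved, stated in full; the proofs are below) =====
def Claim_equal_extract_all_function_calls : Prop := ∀ (text : String), Dom_extract_all_function_calls text → Spec_extract_all_function_calls text (extract_all_function_calls text)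

-- ===== LEMMAS AND PROOFS =====

-- character facts
theorem pv_start_imp_char (c : Char) (h : pvNameStart c = true) : pvNameChar c = true := by
  simp [pvNameStart, pvNameChar, PySem.Chars.isalnum] at *
  tauto

theorem pv_char_not_space (c : Char) (h : pvNameChar c = true) : PySem.Chars.isspace c = false := by
  rcases Bool.eq_false_or_eq_true (PySem.Chars.isspace c) with hs | hs
  swap
  · exact hs
  exfalso
  simp [pvNameChar, PySem.Chars.isalnum, PySem.Chars.isalpha, PySem.Chars.isupper,
    PySem.Chars.islower, PySem.Chars.isdigit] at h
  simp [PySem.Chars.isspace] at hs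
  rcases h with ((⟨a, b⟩ | ⟨a, b⟩) | ⟨a, b⟩) | rfl
  · simp [Char.le_def, UInt32.le_iff_toNat_le] at a b; omega
  · simp [Char.le_def, UInt32.le_iff_toNat_le] at a b; omega
  · simp [Char.le_def, UInt32.le_iff_toNat_le] at a b; omega
  · revert hs; decide

-- scanner facts
theorem pvScan_le (cs : List Char) (j depth : Nat) (ins : Bool) (sc : Option Char) (esc : Bool) :
    j ≤ (pvScan cs j depth ins sc esc).1 := by
  fun_induction pvScan <;> simp_all <;> omega

theorem pvScan_closed (cs : List Char) (j depth : Nat) (ins : Bool) (sc : Option Char) (esc : Bool)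
    (hd : 0 < depth) (h0 : (pvScan cs j depth ins sc esc).2 = 0) :
    0 < (pvScan cs j depth ins sc esc).1 ∧
      cs.getD ((pvScan cs j depth ins sc esc).1 - 1) ' ' = ')' := by
  fun_induction pvScan
  all_goals try (rename_i ih; exact ih (by omega) h0)
  case case7 j depth ins sc esc h ch c2 c3 c4 c5 c6 hcl ih =>
    rcases Nat.eq_zero_or_pos (depth - 1) with hz | hpos
    · rw [hz] at h0 ⊢
      rw [pvScan, dif_neg (by omega : ¬((j + 1 < cs.length ∧ 0 < 0)))]
      refine ⟨by simp, ?_⟩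
      simpa using hcl
    · exact ih hpos h0
  case case9 => simp at h0; omega

-- forward-skip characterizations
theorem pvSkipNonName_le (cs : List Char) (i : Nat) : i ≤ pvSkipNonName cs i := by
  fun_induction pvSkipNonName <;> omega
theorem pvSkipName_le (cs : List Char) (i : Nat) : i ≤ pvSkipName cs i := by
  fun_induction pvSkipName <;> omega
theorem pvSkipWs_le (cs : List Char) (i : Nat) : i ≤ pvSkipWs cs i := by
  fun_induction pvSkipWs <;> omega

theorem pvSkipNonName_mem (cs : List Char) (i p : Nat) (h1 : i ≤ p) (h2 : p < pvSkipNonName cs i) :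
    p < cs.length ∧ pvNameStart (cs.getD p ' ') = false := by
  fun_induction pvSkipNonName with
  | case1 i h ih =>
    rcases Nat.eq_or_lt_of_le h1 with rfl | hlt
    · exact ⟨h.1, h.2⟩
    · exact ih hlt h2
  | case2 i h => omega

theorem pvSkipName_mem (cs : List Char) (i p : Nat) (h1 : i ≤ p) (h2 : p < pvSkipName cs i) :
    p < cs.length ∧ pvNameChar (cs.getD p ' ') = true := by
  fun_induction pvSkipName with
  | case1 i h ih =>
    rcases Nat.eq_or_lt_of_le h1 with rfl | hlt
    · exact ⟨h.1, h.2⟩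
    · exact ih hlt h2
  | case2 i h => omega

theorem pvSkipWs_mem (cs : List Char) (i p : Nat) (h1 : i ≤ p) (h2 : p < pvSkipWs cs i) :
    p < cs.length ∧ PySem.Chars.isspace (cs.getD p ' ') = true := by
  fun_induction pvSkipWs with
  | case1 i h ih =>
    rcases Nat.eq_or_lt_of_le h1 with rfl | hlt
    · exact ⟨h.1, h.2⟩
    · exact ih hlt h2
  | case2 i h => omega

theorem pvSkipNonName_stop (cs : List Char) (i : Nat) (h : pvSkipNonName cs i < cs.length) :
    pvNameStart (cs.getD (pvSkipNonName cs i) ' ') = true := by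
  fun_induction pvSkipNonName with
  | case1 i hc ih => exact ih h
  | case2 i hc =>
    rcases Bool.eq_false_or_eq_true (pvNameStart (cs.getD i ' ')) with hb | hb
    · exact hb
    · exact absurd ⟨h, hb⟩ hc

theorem pvSkipName_stop (cs : List Char) (i : Nat) (h : pvSkipName cs i < cs.length) :
    pvNameChar (cs.getD (pvSkipName cs i) ' ') = false := by
  fun_induction pvSkipName with
  | case1 i hc ih => exact ih h
  | case2 i hc =>
    rcases Bool.eq_false_or_eq_true (pvNameChar (cs.getD i ' ')) with hb | hb
    · exact absurd ⟨h, hb⟩ hc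
    · exact hb

theorem pvSkipWs_stop (cs : List Char) (i : Nat) (h : pvSkipWs cs i < cs.length) :
    PySem.Chars.isspace (cs.getD (pvSkipWs cs i) ' ') = false := by
  fun_induction pvSkipWs with
  | case1 i hc ih => exact ih h
  | case2 i hc =>
    rcases Bool.eq_false_or_eq_true (PySem.Chars.isspace (cs.getD i ' ')) with hb | hb
    · exact absurd ⟨h, hb⟩ hc
    · exact hb

theorem pvSkipName_gt (cs : List Char) (i : Nat) (h1 : i < cs.length)
    (h2 : pvNameChar (cs.getD i ' ') = true) : i < pvSkipName cs i := by
  rw [pvSkipName, dif_pos ⟨h1, h2⟩]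
  have := pvSkipName_le cs (i + 1)
  omega

-- backward-skip characterizations
theorem pvWsBack_le (cs : List Char) (q : Nat) : pvWsBack cs q ≤ q := by
  fun_induction pvWsBack <;> omega
theorem pvWsBack_mem (cs : List Char) (q p : Nat) (h1 : pvWsBack cs q ≤ p) (h2 : p < q) :
    PySem.Chars.isspace (cs.getD p ' ') = true := by
  fun_induction pvWsBack with
  | case1 q h ih =>
    rcases Nat.lt_or_ge p (q - 1) with hlt | hge
    · exact ih h1 hlt
    · have : p = q - 1 := by omega
      subst this; exact h.2
  | case2 q h => omega

theorem pvRunBack_le (cs : List Char) (r : Nat) : pvRunBack cs r ≤ r := by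
  fun_induction pvRunBack <;> omega
theorem pvRunBack_mem (cs : List Char) (r p : Nat) (h1 : pvRunBack cs r ≤ p) (h2 : p < r) :
    pvNameChar (cs.getD p ' ') = true := by
  fun_induction pvRunBack with
  | case1 r h ih =>
    rcases Nat.lt_or_ge p (r - 1) with hlt | hge
    · exact ih h1 hlt
    · have : p = r - 1 := by omega
      subst this; exact h.2
  | case2 r h => omega
theorem pvRunBack_stop (cs : List Char) (r : Nat) (h : 0 < pvRunBack cs r) :
    pvNameChar (cs.getD (pvRunBack cs r - 1) ' ') = false := by
  fun_induction pvRunBack with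
  | case1 r hc ih => exact ih h
  | case2 r hc =>
    rcases Bool.eq_false_or_eq_true (pvNameChar (cs.getD (r - 1) ' ')) with hb | hb
    · exact absurd ⟨h, hb⟩ hc
    · exact hb

theorem pvFirstName_spec (cs : List Char) (r q m : Nat) (h : pvFirstName cs r q = some m) :
    r ≤ m ∧ m < q ∧ pvNameStart (cs.getD m ' ') = true ∧
      ∀ p, r ≤ p → p < m → pvNameStart (cs.getD p ' ') = false := by
  fun_induction pvFirstName with
  | case1 r hrq hname =>
    simp at h; subst h
    exact ⟨le_refl _, hrq, hname, fun p hp1 hp2 => by omega⟩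
  | case2 r hrq hname ih =>
    obtain ⟨a, b, c, d⟩ := ih h
    refine ⟨by omega, b, c, fun p hp1 hp2 => ?_⟩
    rcases Nat.eq_or_lt_of_le hp1 with rfl | hlt
    · simpa using hname
    · exact d p hlt hp2
  | case3 r hrq => simp at h

theorem pvFirstName_found (cs : List Char) (r q p : Nat) (h1 : r ≤ p) (h2 : p < q)
    (h3 : pvNameStart (cs.getD p ' ') = true) : ∃ m, pvFirstName cs r q = some m := by
  fun_induction pvFirstName with
  | case1 r hrq hname => exact ⟨r, rfl⟩
  | case2 r hrq hname ih =>
    rcases Nat.eq_or_lt_of_le h1 with rfl | hlt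
    · simp_all
    · exact ih hlt
  | case3 r hrq => omega

-- wsBack lands exactly on a boundary below an all-whitespace stretch
theorem pvWsBack_eq (cs : List Char) (e : Nat) : ∀ d w, w = e + d →
    (∀ p, e ≤ p → p < w → PySem.Chars.isspace (cs.getD p ' ') = true) →
    (e = 0 ∨ PySem.Chars.isspace (cs.getD (e - 1) ' ') = false) → pvWsBack cs w = e := by
  intro d
  induction d with
  | zero =>
    intro w hw hreg hstop
    have hw' : w = e := by omega
    subst hw'
    have hneg : ¬(0 < w ∧ PySem.Chars.isspace (cs.getD (w - 1) ' ') = true) := by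
      rintro ⟨h1, h2⟩
      rcases hstop with rfl | hs
      · omega
      · rw [h2] at hs; exact Bool.noConfusion hs
    rw [pvWsBack, dif_neg hneg]
  | succ d ihd =>
    intro w hw hreg hstop
    have h1 : PySem.Chars.isspace (cs.getD (w - 1) ' ') = true := hreg (w - 1) (by omega) (by omega)
    rw [pvWsBack, dif_pos ⟨by omega, h1⟩]
    exact ihd (w - 1) (by omega) (fun p a b => hreg p a (by omega)) hstop

-- the invariant: no '(' at or after i backtracks to a name start before i
def pvInv (cs : List Char) (i : Nat) : Prop :=
  ∀ p m, i ≤ p → p < cs.length → cs.getD p ' ' = '(' →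
    pvFirstName cs (pvRunBack cs (pvWsBack cs p)) (pvWsBack cs p) = some m → i ≤ m

theorem pvInv_zero (cs : List Char) : pvInv cs 0 := fun _ _ _ _ _ _ => Nat.zero_le _

theorem pvInv_of_blocker (cs : List Char) (i : Nat) (hb : pvNameChar (cs.getD (i - 1) ' ') = false)
    (hs : PySem.Chars.isspace (cs.getD (i - 1) ' ') = false) : pvInv cs i := by
  rcases Nat.eq_zero_or_pos i with rfl | hi
  · exact pvInv_zero cs
  intro p m hp hpn hpar hfn
  have hq : i ≤ pvWsBack cs p := by
    by_contra hcon
    have h2 := pvWsBack_mem cs p (i - 1) (by omega) (by omega)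
    rw [h2] at hs
    exact Bool.noConfusion hs
  have hr : i ≤ pvRunBack cs (pvWsBack cs p) := by
    by_contra hcon
    have h2 := pvRunBack_mem cs (pvWsBack cs p) (i - 1) (by omega) (by omega)
    rw [h2] at hb
    exact Bool.noConfusion hb
  exact le_trans hr (pvFirstName_spec cs _ _ _ hfn).1

-- unfolded single-iteration forms of pvBLoop (its three exits)
theorem pvBLoop_succ_nil (cs : List Char) (fuel i : Nat) (hi : ¬ i < cs.length) :
    pvBLoop cs (fuel + 1) i = [] := by
  rw [pvBLoop, if_neg hi]

theorem pvBLoop_succ_nopar (cs : List Char) (fuel i : Nat) (hi : i < cs.length)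
    (h : cs.getD i ' ' ≠ '(') : pvBLoop cs (fuel + 1) i = pvBLoop cs fuel (i + 1) := by
  rw [pvBLoop, if_pos hi, if_neg h]

theorem pvBLoop_succ_none (cs : List Char) (fuel i : Nat) (hi : i < cs.length)
    (h : cs.getD i ' ' = '(')
    (hn : pvFirstName cs (pvRunBack cs (pvWsBack cs i)) (pvWsBack cs i) = none) :
    pvBLoop cs (fuel + 1) i = pvBLoop cs fuel (i + 1) := by
  rw [pvBLoop, if_pos hi, if_pos h, hn]

theorem pvBLoop_succ_some (cs : List Char) (fuel i m : Nat) (hi : i < cs.length)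
    (h : cs.getD i ' ' = '(')
    (hm : pvFirstName cs (pvRunBack cs (pvWsBack cs i)) (pvWsBack cs i) = some m) :
    pvBLoop cs (fuel + 1) i =
      if (pvScan cs (i + 1) 1 false none false).2 = 0 then
        String.ofList (PySem.List.slice cs (some ((m : Nat) : Int))
            (some (((pvScan cs (i + 1) 1 false none false).1 : Nat) : Int))) ::
          pvBLoop cs fuel (pvScan cs (i + 1) 1 false none false).1
      else [] := by
  rw [pvBLoop, if_pos hi, if_pos h, hm]

-- pvBLoop does not depend on the fuel once the fuel exceeds the remaining length
theorem pvBLoop_fuel_aux (cs : List Char) : ∀ k f1 f2 i, cs.length - i ≤ k →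
    cs.length - i < f1 → cs.length - i < f2 → pvBLoop cs f1 i = pvBLoop cs f2 i := by
  intro k
  induction k with
  | zero =>
    intro f1 f2 i hk h1 h2
    obtain ⟨g1, rfl⟩ : ∃ g, f1 = g + 1 := ⟨f1 - 1, by omega⟩
    obtain ⟨g2, rfl⟩ : ∃ g, f2 = g + 1 := ⟨f2 - 1, by omega⟩
    rw [pvBLoop_succ_nil cs g1 i (by omega), pvBLoop_succ_nil cs g2 i (by omega)]
  | succ k ih =>
    intro f1 f2 i hk h1 h2
    obtain ⟨g1, rfl⟩ : ∃ g, f1 = g + 1 := ⟨f1 - 1, by omega⟩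
    obtain ⟨g2, rfl⟩ : ∃ g, f2 = g + 1 := ⟨f2 - 1, by omega⟩
    by_cases hi : i < cs.length
    case neg => rw [pvBLoop_succ_nil cs g1 i hi, pvBLoop_succ_nil cs g2 i hi]
    case pos =>
    by_cases hpar : cs.getD i ' ' = '('
    case neg =>
      rw [pvBLoop_succ_nopar cs g1 i hi hpar, pvBLoop_succ_nopar cs g2 i hi hpar]
      exact ih g1 g2 (i + 1) (by omega) (by omega) (by omega)
    case pos =>
      cases hfn : pvFirstName cs (pvRunBack cs (pvWsBack cs i)) (pvWsBack cs i) with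
      | none =>
        rw [pvBLoop_succ_none cs g1 i hi hpar hfn, pvBLoop_succ_none cs g2 i hi hpar hfn]
        exact ih g1 g2 (i + 1) (by omega) (by omega) (by omega)
      | some m =>
        rw [pvBLoop_succ_some cs g1 i m hi hpar hfn, pvBLoop_succ_some cs g2 i m hi hpar hfn]
        have hj := pvScan_le cs (i + 1) 1 false none false
        by_cases hd0 : (pvScan cs (i + 1) 1 false none false).2 = 0
        · rw [if_pos hd0, if_pos hd0,
            ih g1 g2 (pvScan cs (i + 1) 1 false none false).1 (by omega) (by omega) (by omega)]
        · rw [if_neg hd0, if_neg hd0]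

theorem pvBLoop_fuel (cs : List Char) (f1 f2 i : Nat) (h1 : cs.length - i < f1)
    (h2 : cs.length - i < f2) : pvBLoop cs f1 i = pvBLoop cs f2 i :=
  pvBLoop_fuel_aux cs cs.length f1 f2 i (by omega) h1 h2

-- B skips a stretch of positions on which no '(' carries a name
theorem pvBLoop_walk (cs : List Char) (d : Nat) : ∀ p f, cs.length - p < f →
    (∀ u, p ≤ u → u < p + d → u < cs.length ∧
      (cs.getD u ' ' ≠ '(' ∨
        pvFirstName cs (pvRunBack cs (pvWsBack cs u)) (pvWsBack cs u) = none)) →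
    pvBLoop cs f p = pvBLoop cs f (p + d) := by
  induction d with
  | zero => intro p f _ _; rfl
  | succ d ih =>
    intro p f hf hcond
    obtain ⟨g, rfl⟩ : ∃ g, f = g + 1 := ⟨f - 1, by omega⟩
    obtain ⟨hu, hc⟩ := hcond p (le_refl _) (by omega)
    have hstep : pvBLoop cs (g + 1) p = pvBLoop cs g (p + 1) := by
      rcases hc with hc | hc
      · exact pvBLoop_succ_nopar cs g p hu hc
      · by_cases hpar : cs.getD p ' ' = '('
        · exact pvBLoop_succ_none cs g p hu hpar hc
        · exact pvBLoop_succ_nopar cs g p hu hpar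
    have hfuel : pvBLoop cs g (p + 1) = pvBLoop cs (g + 1) (p + 1) :=
      pvBLoop_fuel cs g (g + 1) (p + 1) (by omega) (by omega)
    have harith : p + (d + 1) = (p + 1) + d := by omega
    rw [hstep, hfuel, harith,
      ih (p + 1) (g + 1) (by omega) (fun u h1 h2 => hcond u (by omega) (by omega))]

-- a '(' whose whole backtrack window lies in a no-name-start region finds no name
theorem pvNameless (cs : List Char) (i u : Nat) (hinv : pvInv cs i) (hiu : i ≤ u)
    (hu : u < cs.length) (hpar : cs.getD u ' ' = '(')
    (hreg : ∀ p, i ≤ p → p < u → pvNameStart (cs.getD p ' ') = false) :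
    pvFirstName cs (pvRunBack cs (pvWsBack cs u)) (pvWsBack cs u) = none := by
  cases hfn : pvFirstName cs (pvRunBack cs (pvWsBack cs u)) (pvWsBack cs u) with
  | none => rfl
  | some m =>
    exfalso
    have hm := hinv u m hiu hu hpar hfn
    obtain ⟨_, hmq, hname, _⟩ := pvFirstName_spec cs _ _ _ hfn
    have hmu : m < u := lt_of_lt_of_le hmq (pvWsBack_le cs u)
    have hfalse := hreg m hm hmu
    rw [hname] at hfalse
    exact Bool.noConfusion hfalse

-- ===== main lemma =====
theorem pvMainAux (cs : List Char) : ∀ k i fA fB, cs.length - i ≤ k →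
    cs.length - i < fA → cs.length - i < fB → pvInv cs i →
    pvALoop cs fA i = pvBLoop cs fB i := by
  intro k
  induction k with
  | zero =>
    intro i fA fB hk hfA hfB _
    obtain ⟨gA, rfl⟩ : ∃ g, fA = g + 1 := ⟨fA - 1, by omega⟩
    obtain ⟨gB, rfl⟩ : ∃ g, fB = g + 1 := ⟨fB - 1, by omega⟩
    rw [pvALoop, if_neg (by omega : ¬ i < cs.length), pvBLoop_succ_nil cs gB i (by omega)]
  | succ k ih =>
    intro i fA fB hk hfA hfB hinv
    obtain ⟨gA, rfl⟩ : ∃ g, fA = g + 1 := ⟨fA - 1, by omega⟩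
    obtain ⟨gB, rfl⟩ : ∃ g, fB = g + 1 := ⟨fB - 1, by omega⟩
    by_cases hi : i < cs.length
    case neg => rw [pvALoop, if_neg hi, pvBLoop_succ_nil cs gB i hi]
    case pos =>
    have his := pvSkipNonName_le cs i
    have hreg1 : ∀ p, i ≤ p → p < pvSkipNonName cs i →
        p < cs.length ∧ pvNameStart (cs.getD p ' ') = false :=
      fun p a b => pvSkipNonName_mem cs i p a b
    by_cases hs : pvSkipNonName cs i < cs.length
    case neg =>
      -- A finds no further name start: both return []
      have hA : pvALoop cs (gA + 1) i = [] := by rw [pvALoop, if_pos hi, if_neg hs]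
      have hsl : pvSkipNonName cs i ≤ cs.length := by
        by_contra hcon
        exact absurd (hreg1 cs.length (by omega) (by omega)).1 (by omega)
      have hwalk : pvBLoop cs (gB + 1) i = pvBLoop cs (gB + 1) (i + (pvSkipNonName cs i - i)) := by
        apply pvBLoop_walk cs _ i (gB + 1) (by omega)
        intro u hu1 hu2
        have hu2' : u < pvSkipNonName cs i := by omega
        obtain ⟨hul, _⟩ := hreg1 u hu1 hu2'
        refine ⟨hul, ?_⟩
        by_cases hpar : cs.getD u ' ' = '('
        · exact Or.inr (pvNameless cs i u hinv hu1 hul hpar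
            (fun p a b => (hreg1 p a (by omega)).2))
        · exact Or.inl hpar
      have hfold : i + (pvSkipNonName cs i - i) = pvSkipNonName cs i := by omega
      rw [hA, hwalk, hfold, pvBLoop_succ_nil cs gB _ hs]
    case pos =>
    have hstart := pvSkipNonName_stop cs i hs
    set s := pvSkipNonName cs i with hs_def
    have hse : s < pvSkipName cs s := pvSkipName_gt cs s hs (pv_start_imp_char _ hstart)
    have hreg2 : ∀ p, s ≤ p → p < pvSkipName cs s →
        p < cs.length ∧ pvNameChar (cs.getD p ' ') = true :=
      fun p a b => pvSkipName_mem cs s p a b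
    have hestop : pvSkipName cs s < cs.length → pvNameChar (cs.getD (pvSkipName cs s) ' ') = false :=
      fun h => pvSkipName_stop cs s h
    set e := pvSkipName cs s with he_def
    have hew : e ≤ pvSkipWs cs e := pvSkipWs_le cs e
    have hreg3 : ∀ p, e ≤ p → p < pvSkipWs cs e →
        p < cs.length ∧ PySem.Chars.isspace (cs.getD p ' ') = true :=
      fun p a b => pvSkipWs_mem cs e p a b
    have hwstop : pvSkipWs cs e < cs.length →
        PySem.Chars.isspace (cs.getD (pvSkipWs cs e) ' ') = false :=
      fun h => pvSkipWs_stop cs e h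
    set w := pvSkipWs cs e with hw_def
    have hel : e ≤ cs.length := by
      by_contra hcon
      exact absurd (hreg2 cs.length (by omega) (by omega)).1 (by omega)
    have hwl : w ≤ cs.length := by
      by_contra hcon
      exact absurd (hreg3 cs.length (by omega) (by omega)).1 (by omega)
    -- B skips every position in [i, w): no '(' there carries a name
    have hwalk : pvBLoop cs (gB + 1) i = pvBLoop cs (gB + 1) (i + (w - i)) := by
      apply pvBLoop_walk cs _ i (gB + 1) (by omega)
      intro u hu1 hu2
      have hu2' : u < w := by omega
      by_cases hus : u < s
      · obtain ⟨hul, _⟩ := hreg1 u hu1 hus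
        refine ⟨hul, ?_⟩
        by_cases hpar : cs.getD u ' ' = '('
        · exact Or.inr (pvNameless cs i u hinv hu1 hul hpar
            (fun p a b => (hreg1 p a (by omega)).2))
        · exact Or.inl hpar
      · by_cases hue : u < e
        · obtain ⟨hul, hnc⟩ := hreg2 u (by omega) hue
          refine ⟨hul, Or.inl ?_⟩
          intro hpar; rw [hpar] at hnc; exact absurd hnc (by decide)
        · obtain ⟨hul, hsp⟩ := hreg3 u (by omega) hu2'
          refine ⟨hul, Or.inl ?_⟩
          intro hpar; rw [hpar] at hsp; exact absurd hsp (by decide)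
    have hfold : i + (w - i) = w := by omega
    rw [hfold] at hwalk
    by_cases hw : w < cs.length ∧ cs.getD w ' ' = '('
    case pos =>
      -- the name A found is exactly what B's backtrack from this '(' recovers
      have hq : pvWsBack cs w = e := by
        apply pvWsBack_eq cs e (w - e) w (by omega)
        · intro p a b; exact (hreg3 p a b).2
        · right
          exact pv_char_not_space _ (hreg2 (e - 1) (by omega) (by omega)).2
      have hrs : pvRunBack cs e ≤ s := by
        by_contra hcon
        push Not at hcon
        have hle := pvRunBack_le cs e
        have hstop := pvRunBack_stop cs e (by omega)
        have hnc := (hreg2 (pvRunBack cs e - 1) (by omega) (by omega)).2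
        rw [hnc] at hstop
        exact Bool.noConfusion hstop
      have hfns : pvFirstName cs (pvRunBack cs (pvWsBack cs w)) (pvWsBack cs w) = some s := by
        rw [hq]
        obtain ⟨m, hm⟩ := pvFirstName_found cs (pvRunBack cs e) e s hrs (by omega) hstart
        obtain ⟨hm1, hm2, hm3, hm4⟩ := pvFirstName_spec cs _ _ _ hm
        have hm' : pvFirstName cs (pvRunBack cs (pvWsBack cs w)) (pvWsBack cs w) = some m := by
          rw [hq]; exact hm
        have hmi : i ≤ m := hinv w m (by omega) hw.1 hw.2 hm'
        have hms : m = s := by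
          rcases lt_trichotomy m s with hlt | heq | hgt
          · have hfalse := (hreg1 m hmi hlt).2
            rw [hm3] at hfalse; exact Bool.noConfusion hfalse
          · exact heq
          · have hfalse := hm4 s hrs hgt
            rw [hstart] at hfalse; exact Bool.noConfusion hfalse
        exact hms ▸ hm
      rw [pvALoop, if_pos hi, ← hs_def, ← he_def, ← hw_def, if_pos hs, if_pos hw,
        hwalk, pvBLoop_succ_some cs gB w s hw.1 hw.2 hfns]
      have hj := pvScan_le cs (w + 1) 1 false none false
      by_cases hd0 : (pvScan cs (w + 1) 1 false none false).2 = 0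
      · rw [if_pos hd0, if_pos hd0]
        obtain ⟨hj0, hjc⟩ := pvScan_closed cs (w + 1) 1 false none false (by omega) hd0
        have htail := ih (pvScan cs (w + 1) 1 false none false).1 gA gB (by omega) (by omega)
          (by omega) (pvInv_of_blocker cs _ (by rw [hjc]; decide) (by rw [hjc]; decide))
        rw [htail]
      · rw [if_neg hd0, if_neg hd0]
    case neg =>
      -- no call here: A continues from w, B has walked to w
      rw [pvALoop, if_pos hi, ← hs_def, ← he_def, ← hw_def, if_pos hs, if_neg hw, hwalk]
      apply ih w gA (gB + 1) (by omega) (by omega) (by omega)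
      -- pvInv cs w
      intro p m hwp hpn hpar hfn
      have hmi : i ≤ m := hinv p m (by omega) hpn hpar hfn
      by_contra hcon
      push Not at hcon
      obtain ⟨hrm, hmq, hname, _⟩ := pvFirstName_spec cs _ _ _ hfn
      have hwp' : w < p := by
        rcases Nat.eq_or_lt_of_le hwp with rfl | h
        · exact absurd ⟨hpn, hpar⟩ hw
        · exact h
      rcases Nat.lt_or_ge m s with hms | hms
      · have hfalse := (hreg1 m hmi hms).2
        rw [hname] at hfalse; exact Bool.noConfusion hfalse
      rcases Nat.lt_or_ge m e with hme | hme
      · -- s ≤ m < e: the name would have to reach this later '(' through w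
        rcases Nat.lt_or_ge w (pvWsBack cs p) with hwq | hwq
        · have hnw : pvNameChar (cs.getD w ' ') = true :=
            pvRunBack_mem cs (pvWsBack cs p) w (by omega) hwq
          rcases Nat.eq_or_lt_of_le hew with heqw | hew'
          · have hfalse := hestop (by omega)
            rw [← heqw] at hnw
            rw [hfalse] at hnw
            exact Bool.noConfusion hnw
          · have hspe : PySem.Chars.isspace (cs.getD e ' ') = true := (hreg3 e (le_refl e) hew').2
            have hnce : pvNameChar (cs.getD e ' ') = true :=
              pvRunBack_mem cs (pvWsBack cs p) e (by omega) (by omega)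
            rw [pv_char_not_space _ hnce] at hspe
            exact Bool.noConfusion hspe
        · have hsw : PySem.Chars.isspace (cs.getD w ' ') = true :=
            pvWsBack_mem cs p w hwq hwp'
          rw [hwstop (by omega)] at hsw
          exact Bool.noConfusion hsw
      · have hsm := (hreg3 m hme hcon).2
        rw [pv_char_not_space _ (pv_start_imp_char _ hname)] at hsm
        exact Bool.noConfusion hsm

-- ===== VERDICT (by name: the statement is the Claim_ definition above) =====
theorem extract_all_function_calls_spec : Claim_equal_extract_all_function_calls := by
  intro text _
  unfold Spec_extract_all_function_calls extract_all_function_calls extract_all_function_calls_alt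
  exact pvMainAux text.toList text.toList.length 0 (text.toList.length + 1)
    (text.toList.length + 1) (by omega) (by omega) (by omega) (pvInv_zero _)
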